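-- pv_equiv track=rewrite | github.com/dududum561/adventofcode | day13/part1.py | solve
-- ===== SOURCE A (Python) =====
-- def solve(a, b, prize):
--   ax, ay = a
--   bx, by = b
--   px, py = prize
--   ans = 0
--   for aTries in range(101):
--     x = ax * aTries
--     y = ay * aTries
--     xRem = px - x
--     yRem = py - y
--     if xRem < 0 or yRem < 0: continue
--     if xRem % bx != 0 or yRem % by != 0: continue
--     if xRem // bx != yRem // by: continue
--     bTries = xRem // bx
--     cost = aTries * 3 + bTries * 1
--     if ans == 0 or cost < ans:
--       ans = cost
--   return ans
-- ===== SOURCE B (Python) =====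
-- def _egcd(s, t):
--     # extended Euclid on nonnegative ints: returns (g, u, v) with u*s + v*t == g == gcd(s, t)
--     if t <= 0:
--         return (s, 1, 0)
--     g, u, v = _egcd(t, s % t)
--     return (g, v, u - (s // t) * v)
--
-- def solve(a, b, prize):
--     ax, ay = a
--     bx, by = b
--     px, py = prize
--     det = ax * by - ay * bx
--     if det != 0:
--         # unique rational solution (Cramer); accept only the integral one in range
--         n1 = px * by - py * bx
--         n2 = ax * py - ay * px
--         if n1 % det != 0 or n2 % det != 0:
--             return 0
--         aT = n1 // det
--         bT = n2 // det
--         if 0 <= aT <= 100 and ax * aT <= px and ay * aT <= py: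
--             return aT * 3 + bT
--         return 0
--     # degenerate: button vectors are parallel
--     if px * by != py * bx:
--         return 0
--     # solutions are exactly the aT with bx | (px - ax*aT); solve the congruence
--     M = -bx if bx < 0 else bx
--     A0 = ax % M
--     P0 = px % M
--     g, u, _ = _egcd(A0, M)
--     if P0 % g != 0:
--         return 0
--     m = M // g
--     r = (u * (P0 // g)) % m
--     ans = 0
--     aT = r
--     while aT <= 100:
--         if ax * aT <= px and ay * aT <= py:
--             c = aT * 3 + (px - ax * aT) // bx
--             if ans == 0 or c < ans:
--                 ans = c
--         aT += m
--     return ans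
-- ===== Notes on version B (the rewrite author's own statement) =====
-- stated objective: alternative
-- what changed: Replaces A's fixed 101-iteration scan over aTries with a closed-form Cramer solution when the button vectors are linearly independent, and with an extended-gcd congruence solver that visits only the residue class of feasible aTries when they are parallel.
-- outside the precondition, e.g. on solve((1, 1), (0, 5), (-5, -5)): A returns 0, B returns 0
import Mathlib
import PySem

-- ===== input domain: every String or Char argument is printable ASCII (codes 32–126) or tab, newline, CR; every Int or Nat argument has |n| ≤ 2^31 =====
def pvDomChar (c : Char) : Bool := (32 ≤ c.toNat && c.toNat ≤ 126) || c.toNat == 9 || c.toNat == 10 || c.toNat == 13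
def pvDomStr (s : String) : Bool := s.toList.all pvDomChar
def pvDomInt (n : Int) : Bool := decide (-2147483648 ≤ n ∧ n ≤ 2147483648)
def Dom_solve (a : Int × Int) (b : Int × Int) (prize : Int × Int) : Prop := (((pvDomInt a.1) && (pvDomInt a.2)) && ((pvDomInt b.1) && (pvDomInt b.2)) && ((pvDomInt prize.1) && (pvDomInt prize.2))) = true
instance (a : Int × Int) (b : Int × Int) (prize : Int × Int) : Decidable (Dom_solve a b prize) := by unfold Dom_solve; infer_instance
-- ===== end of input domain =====

-- B replaces A's fixed 101-iteration scan by a closed-form Cramer solution (det ≠ 0) and,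
-- for parallel button vectors, a congruence solver that visits only the feasible counts.

-- ===== PORT A =====
-- loop body of A's `for aTries in range(101)` scan
def aStep (ax ay bx bb px py : Int) (ans aTries : Int) : Int :=
  let x := ax * aTries
  let y := ay * aTries
  let xRem := px - x
  let yRem := py - y
  if xRem < 0 ∨ yRem < 0 then ans
  else if PySem.Int.mod xRem bx ≠ 0 ∨ PySem.Int.mod yRem bb ≠ 0 then ans
  else if PySem.Int.floordiv xRem bx ≠ PySem.Int.floordiv yRem bb then ans
  else
    let bTries := PySem.Int.floordiv xRem bx
    let cost := aTries * 3 + bTries * 1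
    if ans = 0 ∨ cost < ans then cost else ans

def solve (a : Int × Int) (b : Int × Int) (prize : Int × Int) : Int :=
  (PySem.List.pyRange 0 101 1).foldl (aStep a.1 a.2 b.1 b.2 prize.1 prize.2) 0

-- ===== PORT B =====
-- Source B's `_egcd`: returns (g, u, v) with u*s + v*t = g
def egcdB (s t : Int) : Int × Int × Int :=
  if _h : t ≤ 0 then (s, 1, 0)
  else
    let p := egcdB t (PySem.Int.mod s t)
    (p.1, p.2.2, p.2.1 - PySem.Int.floordiv s t * p.2.2)
termination_by t.toNat
decreasing_by
  have h1 : 0 ≤ PySem.Int.mod s t := PySem.Int.mod_nonneg s (by omega)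
  have h2 : PySem.Int.mod s t < t := PySem.Int.mod_lt s (by omega)
  omega

-- Source B's `while aT <= 100` loop; the `0 < m` conjunct is a totality guard only
-- (Source B always reaches the loop with m ≥ 1)
def bLoop (ax ay bx px py m : Int) (ans aT : Int) : Int :=
  if _h : 0 < m ∧ aT ≤ 100 then
    let ans' :=
      if ax * aT ≤ px ∧ ay * aT ≤ py then
        let c := aT * 3 + PySem.Int.floordiv (px - ax * aT) bx
        if ans = 0 ∨ c < ans then c else ans
      else ans
    bLoop ax ay bx px py m ans' (aT + m)
  else ans
termination_by (101 - aT).toNat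
decreasing_by omega

def solve_alt (a : Int × Int) (b : Int × Int) (prize : Int × Int) : Int :=
  let ax := a.1; let ay := a.2
  let bx := b.1; let bb := b.2
  let px := prize.1; let py := prize.2
  let det := ax * bb - ay * bx
  if det ≠ 0 then
    -- unique rational solution (Cramer); accept only the integral one in range
    let n1 := px * bb - py * bx
    let n2 := ax * py - ay * px
    if PySem.Int.mod n1 det ≠ 0 ∨ PySem.Int.mod n2 det ≠ 0 then 0
    else
      let aT := PySem.Int.floordiv n1 det
      let bT := PySem.Int.floordiv n2 det
      if 0 ≤ aT ∧ aT ≤ 100 ∧ ax * aT ≤ px ∧ ay * aT ≤ py then aT * 3 + bT else 0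
  else if px * bb ≠ py * bx then 0
  else
    -- degenerate: parallel buttons; solve the congruence ax*aT ≡ px (mod bx)
    let M := if bx < 0 then -bx else bx
    let A0 := PySem.Int.mod ax M
    let P0 := PySem.Int.mod px M
    let e := egcdB A0 M
    let g := e.1
    let u := e.2.1
    if PySem.Int.mod P0 g ≠ 0 then 0
    else
      let m := PySem.Int.floordiv M g
      let r := PySem.Int.mod (u * PySem.Int.floordiv P0 g) m
      bLoop ax ay bx px py m 0 r

-- ===== PRECONDITION & SPEC =====
-- Pre_ excludes bx = 0 or by = 0: there A raises ZeroDivisionError as soon as some aTries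
-- leaves both remainders nonnegative (on the remaining degenerate inputs it returns 0
-- without ever reaching the modulo).
def Pre_solve (a : Int × Int) (b : Int × Int) (prize : Int × Int) : Prop :=
  b.1 ≠ 0 ∧ b.2 ≠ 0
instance (a : Int × Int) (b : Int × Int) (prize : Int × Int) : Decidable (Pre_solve a b prize) := by unfold Pre_solve; infer_instance

def pvWitness_solve : (Int × Int) × (Int × Int) × (Int × Int) := ((94, 34), (22, 67), (8400, 5400))

def Spec_solve (a : Int × Int) (b : Int × Int) (prize : Int × Int) (out : Int) : Prop := out = solve_alt a b prize
instance (a : Int × Int) (b : Int × Int) (prize : Int × Int) (out : Int) : Decidable (Spec_solve a b prize out) := by unfold Spec_solve; infer_instance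

-- ===== CLAIM (what is proved, stated in full; the proofs are below) =====
def Claim_equal_solve : Prop := ∀ (a : Int × Int) (b : Int × Int) (prize : Int × Int), Dom_solve a b prize → Pre_solve a b prize → Spec_solve a b prize (solve a b prize)

-- ===== LEMMAS AND PROOFS =====

lemma fdiv_exact (b t x : Int) (hb : b ≠ 0) (h : b * t = x) : PySem.Int.floordiv x b = t := by
  have hm : PySem.Int.mod x b = 0 := (PySem.Int.mod_eq_zero_iff_dvd x b).2 ⟨t, h.symm⟩
  have := PySem.Int.floordiv_mul_add_mod x b
  rw [hm, add_zero] at this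
  have : PySem.Int.floordiv x b * b = t * b := by rw [this, ← h]; ring
  exact mul_right_cancel₀ hb this

-- A's acceptance test as a Boolean predicate, and its mathematical reading
def accB (ax ay bx bb px py aT : Int) : Bool :=
  decide (0 ≤ px - ax * aT) && decide (0 ≤ py - ay * aT) &&
  (PySem.Int.mod (px - ax * aT) bx == 0) && (PySem.Int.mod (py - ay * aT) bb == 0) &&
  (PySem.Int.floordiv (px - ax * aT) bx == PySem.Int.floordiv (py - ay * aT) bb)

def acc (ax ay bx bb px py aT : Int) : Prop :=
  0 ≤ px - ax * aT ∧ 0 ≤ py - ay * aT ∧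
  ∃ t : Int, bx * t = px - ax * aT ∧ bb * t = py - ay * aT

def cf (ax bx px aT : Int) : Int := aT * 3 + PySem.Int.floordiv (px - ax * aT) bx * 1

-- generic min-with-ans=0 update step
def mstep (P : Int → Bool) (c : Int → Int) (ans x : Int) : Int :=
  if P x then (if ans = 0 ∨ c x < ans then c x else ans) else ans

lemma aStep_eq_mstep (ax ay bx bb px py ans aT : Int) :
    aStep ax ay bx bb px py ans aT = mstep (accB ax ay bx bb px py) (cf ax bx px) ans aT := by
  by_cases h1 : 0 ≤ px - ax * aT <;> by_cases h2 : 0 ≤ py - ay * aT <;>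
  by_cases h3 : PySem.Int.mod (px - ax * aT) bx = 0 <;> by_cases h4 : PySem.Int.mod (py - ay * aT) bb = 0 <;>
  by_cases h5 : PySem.Int.floordiv (px - ax * aT) bx = PySem.Int.floordiv (py - ay * aT) bb <;>
  simp [aStep, mstep, accB, cf, h3, h4, h5] <;> omega

lemma accB_iff_acc (ax ay bx bb px py aT : Int) (hbx : bx ≠ 0) (hbb : bb ≠ 0) :
    accB ax ay bx bb px py aT = true ↔ acc ax ay bx bb px py aT := by
  simp only [accB, acc, Bool.and_eq_true, decide_eq_true_eq, beq_iff_eq,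
    PySem.Int.mod_eq_zero_iff_dvd]
  constructor
  · rintro ⟨⟨⟨⟨h1, h2⟩, ⟨t1, ht1⟩⟩, ⟨t2, ht2⟩⟩, heq⟩
    refine ⟨h1, h2, PySem.Int.floordiv (px - ax * aT) bx, ?_, ?_⟩
    · rw [ht1, fdiv_exact bx t1 _ hbx rfl]
    · rw [heq, ht2, fdiv_exact bb t2 _ hbb rfl]
  · rintro ⟨h1, h2, t, ht1, ht2⟩
    refine ⟨⟨⟨⟨h1, h2⟩, ⟨t, ht1.symm⟩⟩, ⟨t, ht2.symm⟩⟩, ?_⟩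
    rw [fdiv_exact bx t _ hbx ht1, fdiv_exact bb t _ hbb ht2]

lemma foldl_mstep_none (P : Int → Bool) (c : Int → Int) (l : List Int) (s : Int)
    (h : ∀ x ∈ l, P x = false) : l.foldl (mstep P c) s = s := by
  induction l generalizing s with
  | nil => rfl
  | cons x xs ih =>
    simp only [List.foldl_cons]
    rw [show mstep P c s x = s by simp [mstep, h x (by simp)]]
    exact ih s (fun y hy => h y (by simp [hy]))

lemma foldl_mstep_unique (P : Int → Bool) (c : Int → Int) (l : List Int) (a0 : Int)
    (hnd : l.Nodup) (hu : ∀ x ∈ l, P x = true → x = a0) :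
    l.foldl (mstep P c) 0 = if a0 ∈ l ∧ P a0 = true then c a0 else 0 := by
  induction l with
  | nil => simp
  | cons x xs ih =>
    simp only [List.foldl_cons]
    by_cases hP : P x = true
    · have hx : x = a0 := hu x (by simp) hP
      subst hx
      rw [show mstep P c 0 x = c x by simp [mstep, hP]]
      rw [foldl_mstep_none P c xs (c x) ?_]
      · simp [hP]
      · intro y hy
        by_cases hPy : P y = true
        · exact absurd (hu y (by simp [hy]) hPy ▸ hy) (by simp at hnd; tauto)
        · simpa using hPy
    · rw [show mstep P c 0 x = 0 by simp [mstep, hP]]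
      rw [ih hnd.of_cons (fun y hy h => hu y (by simp [hy]) h)]
      by_cases hax : a0 ∈ xs
      · simp [hax]
      · by_cases hax2 : a0 = x
        · subst hax2; simp [hP, hax]
        · simp [hax, hax2]

lemma foldl_mstep_filter (P Q : Int → Bool) (c : Int → Int) (l : List Int) (s : Int)
    (h : ∀ x, P x = true → Q x = true) :
    l.foldl (mstep P c) s = (l.filter Q).foldl (mstep P c) s := by
  induction l generalizing s with
  | nil => rfl
  | cons x xs ih =>
    by_cases hQ : Q x = true
    · simp only [List.foldl_cons, List.filter_cons, hQ, if_pos]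
      exact ih _
    · have hP : P x = false := by
        cases hPx : P x with
        | false => rfl
        | true => exact absurd (h x hPx) hQ
      simp only [List.foldl_cons, List.filter_cons, hQ]
      rw [show mstep P c s x = s by simp [mstep, hP]]
      simpa using ih s

-- algebraic consequences of A's acceptance
lemma acc_det (ax ay bx bb px py x : Int) (h : acc ax ay bx bb px py x) :
    (ax * bb - ay * bx) * x = px * bb - py * bx := by
  obtain ⟨_, _, t, h1, h2⟩ := h
  linear_combination bb * h1 - bx * h2

lemma acc_det_t (ax ay bx bb px py x t : Int)
    (h1 : bx * t = px - ax * x) (h2 : bb * t = py - ay * x) :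
    (ax * bb - ay * bx) * t = ax * py - ay * px := by
  linear_combination (-ay) * h1 + ax * h2

lemma egcdB_spec (s t : Int) (hs : 0 ≤ s) (ht : 0 ≤ t) :
    (egcdB s t).2.1 * s + (egcdB s t).2.2 * t = (egcdB s t).1 ∧
    (egcdB s t).1 ∣ s ∧ (egcdB s t).1 ∣ t ∧ (0 < t → 0 < (egcdB s t).1) ∧
    (t = 0 → (egcdB s t).1 = s) := by
  induction s, t using egcdB.induct with
  | case1 s t h =>
    have ht0 : t = 0 := le_antisymm h ht
    subst ht0
    rw [egcdB]; simp
  | case2 s t h ih =>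
    have htpos : 0 < t := by omega
    have hm0 : 0 ≤ PySem.Int.mod s t := PySem.Int.mod_nonneg s (by omega)
    obtain ⟨ib, id1, id2, ipos, izero⟩ := ih htpos.le hm0
    have hdm : PySem.Int.floordiv s t * t + PySem.Int.mod s t = s :=
      PySem.Int.floordiv_mul_add_mod s t
    rw [egcdB, dif_neg h]
    refine ⟨?_, ?_, ?_, ?_, ?_⟩
    · simp only []
      linear_combination ib - (egcdB t (PySem.Int.mod s t)).2.2 * hdm
    · show (egcdB t (PySem.Int.mod s t)).1 ∣ s
      have hd : (egcdB t (PySem.Int.mod s t)).1 ∣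
          PySem.Int.floordiv s t * t + PySem.Int.mod s t := dvd_add (id1.mul_left _) id2
      rwa [hdm] at hd
    · exact id1
    · intro _
      rcases lt_or_eq_of_le hm0 with hlt | heq
      · exact ipos hlt
      · rw [izero heq.symm]; exact htpos
    · intro h0; omega

-- remainder characterization: if 0 ≤ ρ < m and m ∣ z - ρ then z % m = ρ
lemma mod_eq_of (z m ρ : Int) (h0 : 0 ≤ ρ) (h1 : ρ < m) (hd : m ∣ z - ρ) :
    PySem.Int.mod z m = ρ := by
  have hm : 0 < m := by omega
  have hdm := PySem.Int.floordiv_mul_add_mod z m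
  have hb1 : 0 ≤ PySem.Int.mod z m := PySem.Int.mod_nonneg z (by omega)
  have hb2 : PySem.Int.mod z m < m := PySem.Int.mod_lt z (by omega)
  have hd2 : m ∣ PySem.Int.mod z m - ρ := by
    have : PySem.Int.mod z m - ρ = (z - ρ) - PySem.Int.floordiv z m * m := by omega
    rw [this]
    exact dvd_sub hd (dvd_mul_left m _)
  have := Int.eq_zero_of_abs_lt_dvd hd2 (by rw [abs_lt]; omega)
  omega

-- first element ≥ lo congruent to r mod m
def apNext (r m lo : Int) : Int := lo + PySem.Int.mod (r - lo) m

lemma apNext_lb (r m lo : Int) (hm : 0 < m) : lo ≤ apNext r m lo := by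
  have := PySem.Int.mod_nonneg (r - lo) (by omega)
  unfold apNext; omega

lemma apNext_eq_self (r m lo : Int) (hm : 0 < m) (hd : m ∣ r - lo) : apNext r m lo = lo := by
  unfold apNext
  rw [mod_eq_of (r - lo) m 0 le_rfl hm (by simpa using hd)]
  omega

lemma apNext_succ_of_dvd (r m lo : Int) (hm : 0 < m) (hd : m ∣ r - lo) :
    apNext r m (lo + 1) = lo + m := by
  unfold apNext
  rw [mod_eq_of (r - (lo + 1)) m (m - 1) (by omega) (by omega)
    (by have : r - (lo + 1) - (m - 1) = (r - lo) - m := by ring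
        rw [this]; exact dvd_sub hd ⟨1, by ring⟩)]
  ring

lemma apNext_succ_of_not_dvd (r m lo : Int) (hm : 0 < m) (hd : ¬ m ∣ r - lo) :
    apNext r m (lo + 1) = apNext r m lo := by
  have hb1 : 0 ≤ PySem.Int.mod (r - lo) m := PySem.Int.mod_nonneg _ (by omega)
  have hb2 : PySem.Int.mod (r - lo) m < m := PySem.Int.mod_lt _ hm
  have hne : PySem.Int.mod (r - lo) m ≠ 0 := by
    intro h0
    exact hd ((PySem.Int.mod_eq_zero_iff_dvd (r - lo) m).1 h0)
  have hdm := PySem.Int.floordiv_mul_add_mod (r - lo) m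
  unfold apNext
  rw [mod_eq_of (r - (lo + 1)) m (PySem.Int.mod (r - lo) m - 1) (by omega) (by omega)
    (by have : r - (lo + 1) - (PySem.Int.mod (r - lo) m - 1) =
          PySem.Int.floordiv (r - lo) m * m := by omega
        rw [this]; exact dvd_mul_left m _)]
  omega

-- shift the congruence to the canonical residues
lemma dvd_shift (M ax px x : Int) :
    (M ∣ px - ax * x) ↔ (M ∣ PySem.Int.mod px M - PySem.Int.mod ax M * x) := by
  have hpx := PySem.Int.floordiv_mul_add_mod px M
  have hax := PySem.Int.floordiv_mul_add_mod ax M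
  have key : px - ax * x = (PySem.Int.mod px M - PySem.Int.mod ax M * x) +
      M * (PySem.Int.floordiv px M - PySem.Int.floordiv ax M * x) := by
    linear_combination (-1 : Int) * hpx + x * hax
  rw [key]
  constructor
  · intro h
    have h2 := dvd_sub h (dvd_mul_right M
      (PySem.Int.floordiv px M - PySem.Int.floordiv ax M * x))
    simpa using h2
  · intro h
    exact dvd_add h (dvd_mul_right M _)

lemma cong_iff (M A0 P0 g u v : Int) (hg : 0 < g)
    (hbez : u * A0 + v * M = g) (hA : g ∣ A0) (hM : g ∣ M) (hP : g ∣ P0) (x : Int) :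
    (M ∣ (P0 - A0 * x)) ↔
    (PySem.Int.floordiv M g) ∣
      (x - PySem.Int.mod (u * PySem.Int.floordiv P0 g) (PySem.Int.floordiv M g)) := by
  obtain ⟨m, hm⟩ := hM
  obtain ⟨s', hs'⟩ := hA
  obtain ⟨p', hp'⟩ := hP
  rw [fdiv_exact g m M (by omega) hm.symm, fdiv_exact g p' P0 (by omega) hp'.symm]
  set r := PySem.Int.mod (u * p') m with hr
  have hur : m ∣ u * p' - r := by
    have hdm := PySem.Int.floordiv_mul_add_mod (u * p') m
    have : u * p' - r = PySem.Int.floordiv (u * p') m * m := by omega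
    rw [this]; exact dvd_mul_left m _
  have hone : u * s' + v * m = 1 := by
    have : g * (u * s' + v * m) = g * 1 := by linear_combination hbez - u * hs' - v * hm
    exact mul_left_cancel₀ (by omega) this
  constructor
  · intro h
    have h2 : m ∣ p' - s' * x := by
      have hgm : g * m ∣ g * (p' - s' * x) := by
        rw [← hm]
        have : g * (p' - s' * x) = P0 - A0 * x := by rw [hp', hs']; ring
        rw [this]; exact h
      exact (mul_dvd_mul_iff_left (show g ≠ 0 by omega)).1 hgm
    have key : x - r = m * (v * x) + (-u) * (p' - s' * x) + (u * p' - r) := by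
      linear_combination (-x) * hone
    rw [key]
    exact dvd_add (dvd_add (dvd_mul_right m _) (h2.mul_left _)) hur
  · intro h
    have h2 : m ∣ p' - s' * x := by
      have key : p' - s' * x = (s' * (u * p' - r) + m * (v * p')) - s' * (x - r) := by
        linear_combination (-p') * hone
      rw [key]
      exact dvd_sub (dvd_add (hur.mul_left _) (dvd_mul_right m _)) (h.mul_left _)
    have : P0 - A0 * x = g * (p' - s' * x) := by rw [hp', hs']; ring
    rw [this, hm]
    exact mul_dvd_mul_left g h2

-- in the degenerate consistent case, acceptance is a sign pair plus one divisibility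
lemma acc_iff_dvd (ax ay bx bb px py x : Int) (hbx : bx ≠ 0)
    (hdet : ax * bb - ay * bx = 0) (hcons : px * bb = py * bx) :
    acc ax ay bx bb px py x ↔
    (0 ≤ px - ax * x ∧ 0 ≤ py - ay * x ∧ bx ∣ (px - ax * x)) := by
  constructor
  · rintro ⟨h1, h2, t, ht1, ht2⟩
    exact ⟨h1, h2, t, ht1.symm⟩
  · rintro ⟨h1, h2, t, ht⟩
    refine ⟨h1, h2, t, ht.symm, ?_⟩
    have key : bx * (bb * t) = bx * (py - ay * x) := by
      linear_combination (-bb) * ht - x * hdet + hcons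
    exact mul_left_cancel₀ hbx key

-- the candidate list visited by bLoop
def apList (m aT : Int) : List Int :=
  if _h : 0 < m ∧ aT ≤ 100 then aT :: apList m (aT + m) else []
termination_by (101 - aT).toNat
decreasing_by omega

lemma filter_ap (r m : Int) (hm : 0 < m) :
    ∀ n : Nat, ∀ lo : Int, (101 - lo).toNat ≤ n →
    (PySem.List.pyRange lo 101 1).filter (fun x => PySem.Int.mod (x - r) m == 0) =
      apList m (apNext r m lo) := by
  intro n
  induction n with
  | zero =>
    intro lo hlo
    rw [PySem.List.pyRange_one_eq_nil (by omega)]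
    rw [apList, dif_neg]
    · rfl
    · have := apNext_lb r m lo hm
      omega
  | succ n ih =>
    intro lo hlo
    by_cases hlo2 : 101 ≤ lo
    · rw [PySem.List.pyRange_one_eq_nil (by omega)]
      rw [apList, dif_neg]
      · rfl
      · have := apNext_lb r m lo hm
        omega
    · rw [PySem.List.pyRange_one_cons (by omega)]
      rw [List.filter_cons]
      by_cases hd : m ∣ r - lo
      · have hc : (PySem.Int.mod (lo - r) m == 0) = true := by
          simp only [beq_iff_eq]
          exact (PySem.Int.mod_eq_zero_iff_dvd _ _).2 ((dvd_sub_comm).1 hd)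
        rw [if_pos hc, ih (lo + 1) (by omega), apNext_succ_of_dvd r m lo hm hd,
          apNext_eq_self r m lo hm hd]
        conv_rhs => rw [apList]
        rw [dif_pos ⟨hm, by omega⟩]
      · have hc : (PySem.Int.mod (lo - r) m == 0) = false := by
          simp only [beq_eq_false_iff_ne, ne_eq, PySem.Int.mod_eq_zero_iff_dvd]
          intro hcc
          exact hd ((dvd_sub_comm).1 hcc)
        rw [if_neg (by simp [hc]), ih (lo + 1) (by omega),
          apNext_succ_of_not_dvd r m lo hm hd]

lemma bLoop_eq_foldl (ax ay bx bb px py m r : Int) (hm : 0 < m)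
    (hacc : ∀ x, m ∣ x - r →
      accB ax ay bx bb px py x = (decide (ax * x ≤ px) && decide (ay * x ≤ py))) :
    ∀ n : Nat, ∀ ans aT : Int, (101 - aT).toNat ≤ n → m ∣ aT - r →
    bLoop ax ay bx px py m ans aT =
      (apList m aT).foldl (mstep (accB ax ay bx bb px py) (cf ax bx px)) ans := by
  intro n
  induction n with
  | zero =>
    intro ans aT hn hd
    rw [bLoop, dif_neg (by omega), apList, dif_neg (by omega)]
    rfl
  | succ n ih =>
    intro ans aT hn hd
    by_cases hT : 101 ≤ aT
    · rw [bLoop, dif_neg (by omega), apList, dif_neg (by omega)]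
      rfl
    · rw [bLoop, dif_pos ⟨hm, by omega⟩, apList, dif_pos ⟨hm, by omega⟩]
      simp only [List.foldl_cons]
      rw [ih _ (aT + m) (by omega) (by have : aT + m - r = (aT - r) + m := by ring
                                       rw [this]; exact dvd_add hd ⟨1, by ring⟩)]
      congr 1
      rw [mstep, hacc aT hd]
      by_cases hs1 : ax * aT ≤ px <;> by_cases hs2 : ay * aT ≤ py <;>
        simp [hs1, hs2, cf]

lemma solve_eq_fold (ax ay bx bb px py : Int) :
    solve (ax, ay) (bx, bb) (px, py) =
      (PySem.List.pyRange 0 101 1).foldl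
        (mstep (accB ax ay bx bb px py) (cf ax bx px)) 0 := by
  unfold solve
  simp only []
  congr 1
  funext ans aT
  exact aStep_eq_mstep ax ay bx bb px py ans aT

lemma cramer_none (ax ay bx bb px py : Int) (hbx : bx ≠ 0) (hbb : bb ≠ 0)
    (hnd : ¬((ax * bb - ay * bx) ∣ (px * bb - py * bx) ∧
             (ax * bb - ay * bx) ∣ (ax * py - ay * px))) :
    (PySem.List.pyRange 0 101 1).foldl (mstep (accB ax ay bx bb px py) (cf ax bx px)) 0 = 0 := by
  apply foldl_mstep_none
  intro x hx
  cases hA : accB ax ay bx bb px py x with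
  | false => rfl
  | true =>
    exfalso
    have hacc := (accB_iff_acc ax ay bx bb px py x hbx hbb).1 hA
    obtain ⟨_, _, t, ht1, ht2⟩ := hacc
    exact hnd ⟨⟨x, (acc_det ax ay bx bb px py x ⟨by omega, by omega, t, ht1, ht2⟩).symm⟩,
      ⟨t, (acc_det_t ax ay bx bb px py x t ht1 ht2).symm⟩⟩

lemma cramer_fold (ax ay bx bb px py : Int) (hbx : bx ≠ 0) (hbb : bb ≠ 0)
    (hdet : ax * bb - ay * bx ≠ 0)
    (hd1 : (ax * bb - ay * bx) ∣ (px * bb - py * bx))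
    (hd2 : (ax * bb - ay * bx) ∣ (ax * py - ay * px)) :
    (PySem.List.pyRange 0 101 1).foldl (mstep (accB ax ay bx bb px py) (cf ax bx px)) 0 =
      (let a0 := PySem.Int.floordiv (px * bb - py * bx) (ax * bb - ay * bx)
       let bT := PySem.Int.floordiv (ax * py - ay * px) (ax * bb - ay * bx)
       if 0 ≤ a0 ∧ a0 ≤ 100 ∧ ax * a0 ≤ px ∧ ay * a0 ≤ py then a0 * 3 + bT else 0) := by
  obtain ⟨c1, hc1⟩ := hd1
  obtain ⟨c2, hc2⟩ := hd2
  rw [fdiv_exact _ c1 _ hdet hc1.symm, fdiv_exact _ c2 _ hdet hc2.symm]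
  have hbxc : bx * c2 = px - ax * c1 := by
    apply mul_left_cancel₀ hdet
    linear_combination (-bx) * hc2 + (-ax) * hc1
  have hbbc : bb * c2 = py - ay * c1 := by
    apply mul_left_cancel₀ hdet
    linear_combination (-bb) * hc2 + (-ay) * hc1
  show _ = if 0 ≤ c1 ∧ c1 ≤ 100 ∧ ax * c1 ≤ px ∧ ay * c1 ≤ py then c1 * 3 + c2 else 0
  rw [foldl_mstep_unique _ _ _ c1 (PySem.List.nodup_pyRange_one 0 101) ?uniq]
  case uniq =>
    intro x hx hA
    have hacc := (accB_iff_acc ax ay bx bb px py x hbx hbb).1 hA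
    have := acc_det ax ay bx bb px py x hacc
    have h2 : (ax * bb - ay * bx) * x = (ax * bb - ay * bx) * c1 := by
      rw [this, hc1]
    exact mul_left_cancel₀ hdet h2
  simp only [PySem.List.mem_pyRange_one]
  by_cases hr : 0 ≤ c1 ∧ c1 ≤ 100 ∧ ax * c1 ≤ px ∧ ay * c1 ≤ py
  · rw [if_pos hr, if_pos ?mem]
    case mem =>
      refine ⟨⟨by omega, by omega⟩, ?_⟩
      exact (accB_iff_acc ax ay bx bb px py c1 hbx hbb).2
        ⟨by omega, by omega, c2, hbxc, hbbc⟩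
    show cf ax bx px c1 = c1 * 3 + c2
    unfold cf
    rw [fdiv_exact bx c2 _ hbx hbxc]
    ring
  · rw [if_neg hr, if_neg ?nmem]
    case nmem =>
      rintro ⟨⟨hm1, hm2⟩, hA⟩
      obtain ⟨ha1, ha2, -⟩ := (accB_iff_acc ax ay bx bb px py c1 hbx hbb).1 hA
      exact hr ⟨by omega, by omega, by omega, by omega⟩

lemma degenerate_inconsistent (ax ay bx bb px py : Int) (hbx : bx ≠ 0) (hbb : bb ≠ 0)
    (hdet : ax * bb - ay * bx = 0) (hcons : px * bb ≠ py * bx) :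
    (PySem.List.pyRange 0 101 1).foldl (mstep (accB ax ay bx bb px py) (cf ax bx px)) 0 = 0 := by
  apply foldl_mstep_none
  intro x hx
  cases hA : accB ax ay bx bb px py x with
  | false => rfl
  | true =>
    exfalso
    have hacc := (accB_iff_acc ax ay bx bb px py x hbx hbb).1 hA
    have := acc_det ax ay bx bb px py x hacc
    rw [hdet, zero_mul] at this
    exact hcons (by omega)

lemma degenerate_unsolvable (ax ay bx bb px py M : Int) (hbx : bx ≠ 0) (hbb : bb ≠ 0)
    (hdet : ax * bb - ay * bx = 0) (hcons : px * bb = py * bx)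
    (hMdef : M = if bx < 0 then -bx else bx)
    (hg : PySem.Int.mod (PySem.Int.mod px M) (egcdB (PySem.Int.mod ax M) M).1 ≠ 0) :
    (PySem.List.pyRange 0 101 1).foldl (mstep (accB ax ay bx bb px py) (cf ax bx px)) 0 = 0 := by
  have hM : 0 < M := by rw [hMdef]; split_ifs <;> omega
  obtain ⟨bez, gA, gM, gpos', _⟩ :=
    egcdB_spec (PySem.Int.mod ax M) M (PySem.Int.mod_nonneg ax (by omega)) (by omega)
  have hgpos := gpos' hM
  apply foldl_mstep_none
  intro x _
  cases hA : accB ax ay bx bb px py x with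
  | false => rfl
  | true =>
    exfalso
    have hacc := ((accB_iff_acc ax ay bx bb px py x hbx hbb).trans
      (acc_iff_dvd ax ay bx bb px py x hbx hdet hcons)).1 hA
    have hdvd : bx ∣ px - ax * x := hacc.2.2
    have hdvdM : M ∣ px - ax * x := by
      rw [hMdef]; split_ifs
      · exact (neg_dvd).2 hdvd
      · exact hdvd
    have hshift := (dvd_shift M ax px x).1 hdvdM
    have hgP : (egcdB (PySem.Int.mod ax M) M).1 ∣ PySem.Int.mod px M := by
      have h1 : (egcdB (PySem.Int.mod ax M) M).1 ∣
          PySem.Int.mod px M - PySem.Int.mod ax M * x := dvd_trans gM hshift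
      have h2 : (egcdB (PySem.Int.mod ax M) M).1 ∣ PySem.Int.mod ax M * x := gA.mul_right x
      have := dvd_add h1 h2
      simpa using this
    exact hg ((PySem.Int.mod_eq_zero_iff_dvd _ _).2 hgP)

lemma degenerate_solvable (ax ay bx bb px py M : Int) (hbx : bx ≠ 0) (hbb : bb ≠ 0)
    (hdet : ax * bb - ay * bx = 0) (hcons : px * bb = py * bx)
    (hMdef : M = if bx < 0 then -bx else bx)
    (hg : PySem.Int.mod (PySem.Int.mod px M) (egcdB (PySem.Int.mod ax M) M).1 = 0) :
    (PySem.List.pyRange 0 101 1).foldl (mstep (accB ax ay bx bb px py) (cf ax bx px)) 0 =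
      bLoop ax ay bx px py
        (PySem.Int.floordiv M (egcdB (PySem.Int.mod ax M) M).1) 0
        (PySem.Int.mod
          ((egcdB (PySem.Int.mod ax M) M).2.1 *
            PySem.Int.floordiv (PySem.Int.mod px M) (egcdB (PySem.Int.mod ax M) M).1)
          (PySem.Int.floordiv M (egcdB (PySem.Int.mod ax M) M).1)) := by
  have hM : 0 < M := by rw [hMdef]; split_ifs <;> omega
  obtain ⟨bez, gA, gM, gpos', _⟩ :=
    egcdB_spec (PySem.Int.mod ax M) M (PySem.Int.mod_nonneg ax (by omega)) (by omega)
  have hgpos := gpos' hM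
  have hgP : (egcdB (PySem.Int.mod ax M) M).1 ∣ PySem.Int.mod px M :=
    (PySem.Int.mod_eq_zero_iff_dvd _ _).1 hg
  obtain ⟨m', hm'⟩ := gM
  have hfdiv : PySem.Int.floordiv M (egcdB (PySem.Int.mod ax M) M).1 = m' :=
    fdiv_exact _ m' M (by omega) hm'.symm
  have hmpos : 0 < m' := by
    by_contra hc
    push_neg at hc
    have := mul_nonpos_of_nonneg_of_nonpos (le_of_lt hgpos) hc
    rw [← hm'] at this
    omega
  rw [hfdiv]
  set r := PySem.Int.mod
    ((egcdB (PySem.Int.mod ax M) M).2.1 *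
      PySem.Int.floordiv (PySem.Int.mod px M) (egcdB (PySem.Int.mod ax M) M).1) m' with hrdef
  have hr0 : 0 ≤ r := PySem.Int.mod_nonneg _ (by omega)
  have hrm : r < m' := PySem.Int.mod_lt _ hmpos
  have habs : ∀ z : Int, bx ∣ z ↔ M ∣ z := by
    intro z; rw [hMdef]; split_ifs
    · exact (neg_dvd).symm
    · exact Iff.rfl
  have hcongx : ∀ x : Int, (bx ∣ (px - ax * x)) ↔ m' ∣ (x - r) := by
    intro x
    rw [habs, dvd_shift M ax px x]
    have hci := cong_iff M (PySem.Int.mod ax M) (PySem.Int.mod px M)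
      (egcdB (PySem.Int.mod ax M) M).1 (egcdB (PySem.Int.mod ax M) M).2.1
      (egcdB (PySem.Int.mod ax M) M).2.2 hgpos bez gA ⟨m', hm'⟩ hgP x
    rw [hfdiv] at hci
    exact hci
  have hiff : ∀ x : Int, (accB ax ay bx bb px py x = true ↔
      (0 ≤ px - ax * x ∧ 0 ≤ py - ay * x ∧ bx ∣ (px - ax * x))) := fun x =>
    (accB_iff_acc ax ay bx bb px py x hbx hbb).trans
      (acc_iff_dvd ax ay bx bb px py x hbx hdet hcons)
  have hacc : ∀ x, m' ∣ x - r →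
      accB ax ay bx bb px py x = (decide (ax * x ≤ px) && decide (ay * x ≤ py)) := by
    intro x hx
    by_cases h1 : ax * x ≤ px <;> by_cases h2 : ay * x ≤ py <;>
      simp only [h1, h2, decide_true, decide_false, Bool.and_true, Bool.and_false,
        Bool.true_and, Bool.false_and]
    · exact (hiff x).2 ⟨by omega, by omega, (hcongx x).2 hx⟩
    all_goals {
      cases hA : accB ax ay bx bb px py x with
      | false => rfl
      | true =>
        exfalso
        have := (hiff x).1 hA
        omega }
  have himp : ∀ x, accB ax ay bx bb px py x = true →
      (PySem.Int.mod (x - r) m' == 0) = true := by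
    intro x hA
    have := ((hiff x).1 hA).2.2
    simp only [beq_iff_eq]
    exact (PySem.Int.mod_eq_zero_iff_dvd _ _).2 ((hcongx x).1 this)
  rw [foldl_mstep_filter _ (fun x => PySem.Int.mod (x - r) m' == 0) _ _ _ himp,
    filter_ap r m' hmpos 101 0 (by norm_num),
    show apNext r m' 0 = r by
      unfold apNext
      rw [mod_eq_of (r - 0) m' r hr0 hrm (by simp)]
      omega]
  rw [bLoop_eq_foldl ax ay bx bb px py m' r hmpos hacc 101 0 r (by omega) (by simp)]

-- ===== VERDICT (by name: the statement is the Claim_ definition above) =====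
theorem solve_spec : Claim_equal_solve := by
  unfold Claim_equal_solve
  rintro ⟨ax, ay⟩ ⟨bx, bb⟩ ⟨px, py⟩ _ ⟨hbx, hbb⟩
  unfold Spec_solve
  rw [solve_eq_fold]
  simp only [solve_alt]
  simp only [ne_eq] at hbx hbb
  split_ifs with hdet hmod hrange hcons hMneg hg hg2
  · -- det ≠ 0, Cramer numerators not divisible: no accepted aTries
    apply cramer_none ax ay bx bb px py hbx hbb
    rintro ⟨h1, h2⟩
    rcases hmod with h | h <;>
      exact h ((PySem.Int.mod_eq_zero_iff_dvd _ _).2 (by assumption))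
  · -- det ≠ 0, integral solution in range
    push_neg at hmod
    rw [cramer_fold ax ay bx bb px py hbx hbb hdet
      ((PySem.Int.mod_eq_zero_iff_dvd _ _).1 hmod.1)
      ((PySem.Int.mod_eq_zero_iff_dvd _ _).1 hmod.2)]
    simp only []
    rw [if_pos hrange]
  · -- det ≠ 0, integral solution out of range
    push_neg at hmod
    rw [cramer_fold ax ay bx bb px py hbx hbb hdet
      ((PySem.Int.mod_eq_zero_iff_dvd _ _).1 hmod.1)
      ((PySem.Int.mod_eq_zero_iff_dvd _ _).1 hmod.2)]
    simp only []
    rw [if_neg hrange]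
  · -- det = 0, inconsistent system
    push_neg at hdet
    exact degenerate_inconsistent ax ay bx bb px py hbx hbb hdet hcons
  · -- det = 0, consistent, bx < 0, congruence unsolvable
    push_neg at hdet hcons
    exact degenerate_unsolvable ax ay bx bb px py (-bx) hbx hbb hdet hcons
      (by rw [if_pos hMneg]) hg
  · -- det = 0, consistent, bx < 0, congruence solvable
    push_neg at hdet hcons hg
    exact degenerate_solvable ax ay bx bb px py (-bx) hbx hbb hdet hcons
      (by rw [if_pos hMneg]) hg
  · -- det = 0, consistent, 0 < bx, congruence unsolvable
    push_neg at hdet hcons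
    exact degenerate_unsolvable ax ay bx bb px py bx hbx hbb hdet hcons
      (by rw [if_neg hMneg]) hg2
  · -- det = 0, consistent, 0 < bx, congruence solvable
    push_neg at hdet hcons hg2
    exact degenerate_solvable ax ay bx bb px py bx hbx hbb hdet hcons
      (by rw [if_neg hMneg]) hg2
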